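-- pv_equiv track=rewrite | github.com/easyfun/my_projects | python34/account_system/create_user_data_file_v2.py | Con10ToN
-- ===== SOURCE A (Python) =====
-- def Con10ToN(base, number, bits):
-- 	result = []
-- 	n = 0
-- 	shan = number
-- 	while n < bits:
-- 		yu = shan % base
-- 		shan //= base
-- 		result.append(yu)
-- 		n += 1
-- 	result.reverse()
-- 	return result
-- ===== SOURCE B (Python) =====
-- def Con10ToN(base, number, bits):
--     # Stage 1: materialize the chain of successive floor quotients.
--     chain = [number]
--     for _ in range(bits):
--         chain.append(chain[-1] // base)
--     # Stage 2: each digit is recovered arithmetically from two adjacent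
--     # quotients (n % b == n - b*(n // b)), emitted most-significant first.
--     return [chain[j] - base * chain[j + 1] for j in range(bits - 1, -1, -1)]
-- ===== Notes on version B (the rewrite author's own statement) =====
-- stated objective: alternative
-- what changed: B works in two staged passes: it first materializes the whole chain of successive floor quotients, then derives each digit arithmetically as chain[j] - base*chain[j+1] directly in most-significant-first order, using no modulo, no running result list and no reverse.
import Mathlib
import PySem

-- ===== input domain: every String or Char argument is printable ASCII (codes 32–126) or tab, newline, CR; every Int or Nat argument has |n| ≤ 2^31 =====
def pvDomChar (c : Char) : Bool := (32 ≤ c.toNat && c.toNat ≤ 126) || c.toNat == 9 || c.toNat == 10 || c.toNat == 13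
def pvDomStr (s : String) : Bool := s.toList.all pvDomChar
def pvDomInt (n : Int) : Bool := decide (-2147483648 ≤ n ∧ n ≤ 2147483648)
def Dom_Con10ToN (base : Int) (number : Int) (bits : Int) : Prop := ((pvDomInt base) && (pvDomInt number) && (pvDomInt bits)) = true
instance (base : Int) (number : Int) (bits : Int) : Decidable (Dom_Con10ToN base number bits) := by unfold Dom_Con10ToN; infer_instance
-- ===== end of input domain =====

-- B re-derives each digit arithmetically from a pre-built quotient chain (chain[j] - base*chain[j+1], MSB-first), with no modulo, no running result list and no reverse (alternative decomposition, same cost).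


-- ===== PORT A =====
-- A's while loop: n counts 0..bits-1, so it runs bits.toNat times; each step appends shan % base and floor-divides shan.
def aLoop (base : Int) (shan : Int) (result : List Int) : Nat → List Int
  | 0 => result
  | k + 1 => aLoop base (PySem.Int.floordiv shan base) (result ++ [PySem.Int.mod shan base]) k

def Con10ToN (base : Int) (number : Int) (bits : Int) : List Int :=
  (aLoop base number [] bits.toNat).reverse

-- ===== PORT B =====
-- Stage 1: the chain of successive floor quotients [number, number//base, ...], length bits+1.
def bChain (base : Int) (x : Int) : Nat → List Int
  | 0 => [x]
  | k + 1 => x :: bChain base (PySem.Int.floordiv x base) k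

-- Stage 2: digits from adjacent chain entries, most-significant first
-- (the comprehension over j = bits-1 .. 0, transcribed structurally on the chain).
def bDigits (base : Int) : List Int → List Int
  | [] => []
  | [_] => []
  | c :: c' :: rest => bDigits base (c' :: rest) ++ [c - base * c']

def Con10ToN_alt (base : Int) (number : Int) (bits : Int) : List Int :=
  bDigits base (bChain base number bits.toNat)

-- ===== PRECONDITION & SPEC =====
-- Pre_ excludes exactly the inputs where Python raises ZeroDivisionError: base = 0 with at least one loop iteration (both A and B raise there).
def Pre_Con10ToN (base : Int) (_number : Int) (bits : Int) : Prop := base ≠ 0 ∨ bits ≤ 0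
instance (base : Int) (number : Int) (bits : Int) : Decidable (Pre_Con10ToN base number bits) := by unfold Pre_Con10ToN; infer_instance
def pvWitness_Con10ToN : Int × Int × Int := (2, 5, 3)

def Spec_Con10ToN (base : Int) (number : Int) (bits : Int) (out : List Int) : Prop := out = Con10ToN_alt base number bits
instance (base : Int) (number : Int) (bits : Int) (out : List Int) : Decidable (Spec_Con10ToN base number bits out) := by unfold Spec_Con10ToN; infer_instance

-- ===== CLAIM (what is proved, stated in full; the proofs are below) =====
def Claim_equal_Con10ToN : Prop := ∀ (base : Int) (number : Int) (bits : Int), Dom_Con10ToN base number bits → Pre_Con10ToN base number bits → Spec_Con10ToN base number bits (Con10ToN base number bits)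

-- ===== LEMMAS AND PROOFS =====

-- Python's n % b equals n - b*(n // b) for every b (PySem.Int.floordiv_mul_add_mod).
theorem mod_as_sub (q base : Int) :
    q - base * PySem.Int.floordiv q base = PySem.Int.mod q base := by
  have h := PySem.Int.floordiv_mul_add_mod q base
  linarith [h]

-- Reversing A's append-accumulator loop yields B's chain-difference digits.
theorem aLoop_eq_digits (base : Int) (k : Nat) : ∀ (q : Int) (res : List Int),
    (aLoop base q res k).reverse = bDigits base (bChain base q k) ++ res.reverse := by
  induction k with
  | zero => intro q res; simp [aLoop, bChain, bDigits]
  | succ k ih =>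
    intro q res
    rw [aLoop, ih, bChain]
    cases k with
    | zero => simp [bChain, bDigits, mod_as_sub]
    | succ k => simp [bChain, bDigits, mod_as_sub]

-- ===== VERDICT (by name: the statement is the Claim_ definition above) =====
theorem Con10ToN_spec : Claim_equal_Con10ToN := by
  intro base number bits _ _
  unfold Spec_Con10ToN Con10ToN Con10ToN_alt
  rw [aLoop_eq_digits]
  simp
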